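-- pv_equiv track=rewrite | github.com/pmaklary/PyCollection | TextBunchDiff.py | txtBuncToDict
-- ===== SOURCE A (Python) =====
-- def txtBuncToDict(txtBunch):
--     pos = 0
--     dct = {}
--     oneLine = ""
--     for c in txtBunch:
--         if pos == 0 :
--             pos = 1
--             continue
--         if c == '\n' :
--            try:
--                dct[oneLine] += 1
--            except KeyError:
--                dct[oneLine] = 1
--
--            oneLine = ""
--         else:
--             oneLine += c
--         pos += 1
--     return dct
-- ===== SOURCE B (Python) =====
-- def txtBuncToDict(txtBunch):
--     dct = {}
--     for line in txtBunch[1:].split('\n')[:-1]: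
--         dct[line] = dct.get(line, 0) + 1
--     return dct
-- ===== Notes on version B (the rewrite author's own statement) =====
-- stated objective: simpler
-- what changed: Replaces A's character-by-character state machine (position flag, manual line accumulator, try/except counting) with slicing off the first character, splitting on the newline separator, dropping the unterminated last segment, and tallying the lines in one dict.get pass.
import Mathlib
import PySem

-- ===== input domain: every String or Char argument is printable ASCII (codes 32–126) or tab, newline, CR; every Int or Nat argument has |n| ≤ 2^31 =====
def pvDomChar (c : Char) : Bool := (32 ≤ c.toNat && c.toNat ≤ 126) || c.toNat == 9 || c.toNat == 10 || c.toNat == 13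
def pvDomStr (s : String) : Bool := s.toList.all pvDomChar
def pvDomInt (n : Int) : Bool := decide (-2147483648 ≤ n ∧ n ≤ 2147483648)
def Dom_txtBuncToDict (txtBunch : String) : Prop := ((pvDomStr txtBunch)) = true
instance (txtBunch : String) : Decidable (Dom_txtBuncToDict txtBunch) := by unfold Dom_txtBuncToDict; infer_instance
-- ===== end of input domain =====

-- B replaces A's character-by-character line-building state machine by slice/split/dropLast
-- followed by a single counting pass (objective: simpler decomposition; same return value).


-- ===== PORT A =====
-- one loop iteration of A: state (pos, dct, oneLine); the try/except increment is Dict.modify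
def txtBuncToDictStep (st : Int × PySem.Dict (List Char) Int × List Char) (c : Char) :
    Int × PySem.Dict (List Char) Int × List Char :=
  match st with
  | (pos, dct, oneLine) =>
    if pos == 0 then (1, dct, oneLine)
    else if c == '\n' then (pos + 1, dct.modify oneLine 0 (· + 1), [])
    else (pos + 1, dct, oneLine ++ [c])

def txtBuncToDict (txtBunch : String) : List (String × Int) :=
  let st := txtBunch.toList.foldl txtBuncToDictStep (0, PySem.Dict.empty, [])
  st.2.1.items.map (fun p => (String.ofList p.1, p.2))

-- ===== PORT B =====
-- txtBunch[1:].split('\n')[:-1], then one counting pass with dct[line] = dct.get(line, 0) + 1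
def txtBuncToDict_alt (txtBunch : String) : List (String × Int) :=
  let parts := (PySem.List.slice txtBunch.toList (some 1) none).splitOn '\n'
  let lines := PySem.List.slice parts none (some (-1))
  let dct := lines.foldl (fun d l => d.insert l (d.getD l 0 + 1)) PySem.Dict.empty
  dct.items.map (fun p => (String.ofList p.1, p.2))

-- ===== PRECONDITION & SPEC =====
def Spec_txtBuncToDict (txtBunch : String) (out : List (String × Int)) : Prop := out = txtBuncToDict_alt txtBunch
instance (txtBunch : String) (out : List (String × Int)) : Decidable (Spec_txtBuncToDict txtBunch out) := by unfold Spec_txtBuncToDict; infer_instance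

-- ===== CLAIM (what is proved, stated in full; the proofs are below) =====
def Claim_equal_txtBuncToDict : Prop := ∀ (txtBunch : String), Dom_txtBuncToDict txtBunch → Spec_txtBuncToDict txtBunch (txtBuncToDict txtBunch)

-- ===== LEMMAS AND PROOFS =====

-- A's loop over the remaining characters builds exactly the count-fold over the
-- '\n'-terminated lines of acc ++ cs (the unterminated tail is never counted).
theorem txtBuncToDict_loop (cs : List Char) :
    ∀ (pos : Int) (d : PySem.Dict (List Char) Int) (acc : List Char),
      1 ≤ pos → '\n' ∉ acc →
      (cs.foldl txtBuncToDictStep (pos, d, acc)).2.1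
        = (((acc ++ cs).splitOn '\n').dropLast).foldl (fun d l => d.modify l 0 (· + 1)) d := by
  induction cs with
  | nil =>
    intro pos d acc hpos hacc
    have hfree : ∀ x ∈ acc, ¬((x == '\n') = true) := by
      intro x hx h
      exact hacc (beq_iff_eq.mp h ▸ hx)
    rw [List.foldl_nil, List.append_nil, List.splitOn, List.splitOnP_eq_single _ _ hfree]
    simp
  | cons c cs ih =>
    intro pos d acc hpos hacc
    have hfree : ∀ x ∈ acc, ¬((x == '\n') = true) := by
      intro x hx h
      exact hacc (beq_iff_eq.mp h ▸ hx)
    rw [List.foldl_cons]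
    have hpos0 : (pos == 0) = false := by simp; omega
    by_cases hc : c = '\n'
    · subst hc
      simp only [txtBuncToDictStep, hpos0, Bool.false_eq_true, if_false, beq_self_eq_true,
        if_true]
      rw [ih (pos + 1) _ [] (by omega) (by simp)]
      have hne : cs.splitOnP (· == '\n') ≠ [] := List.splitOnP_ne_nil _ cs
      simp only [List.splitOn, List.nil_append]
      rw [List.splitOnP_first _ acc hfree '\n' (by simp) cs,
        List.dropLast_cons_of_ne_nil hne, List.foldl_cons]
    · have hcb : (c == '\n') = false := by simpa using hc
      simp only [txtBuncToDictStep, hpos0, Bool.false_eq_true, if_false, hcb]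
      rw [ih (pos + 1) d (acc ++ [c]) (by omega)
        (by simp [hacc]; rintro rfl; exact hc rfl)]
      simp

-- B's insert-based counting fold from the empty dict is A's modify-based fold (both are Counter).
theorem insert_fold_eq_modify_fold (lines : List (List Char)) :
    lines.foldl (fun (d : PySem.Dict (List Char) Int) l => d.insert l (d.getD l 0 + 1))
        PySem.Dict.empty
      = lines.foldl (fun d l => d.modify l 0 (· + 1)) PySem.Dict.empty := by
  rw [PySem.Dict.foldl_insert_getD_add_one_eq_counter, PySem.Dict.counter_eq_foldl]

-- ===== VERDICT (by name: the statement is the Claim_ definition above) =====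
theorem txtBuncToDict_spec : Claim_equal_txtBuncToDict := by
  intro txtBunch _
  unfold Spec_txtBuncToDict txtBuncToDict txtBuncToDict_alt
  simp only [PySem.List.slice_from_one, PySem.List.slice_to_neg_one]
  rw [insert_fold_eq_modify_fold]
  cases h : txtBunch.toList with
  | nil => simp
  | cons c rest =>
    rw [List.foldl_cons]
    have hfirst : txtBuncToDictStep (0, PySem.Dict.empty, []) c = (1, PySem.Dict.empty, []) := by
      simp [txtBuncToDictStep]
    rw [hfirst, txtBuncToDict_loop rest 1 PySem.Dict.empty [] (by omega) (by simp)]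
    simp
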